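-- pv_equiv track=rewrite | github.com/tobisamcode/daily-challenge | 18 - Binary Gap Length/solution.py | binary_gap_length
-- ===== SOURCE A (Python) =====
-- def binary_gap_length(n):
--     binary = bin(n)
--     gaps = binary.split("1") # Split the binary string into an array of gaps
--     gaps.pop() # Remove the last gap
--
--     max_gap = 0
--     for gap in gaps:
--         max_gap = max(max_gap, len(gap))
--
--     return max_gap
-- ===== SOURCE B (Python) =====
-- def binary_gap_length(n):
--     # One pass over bin(n): count consecutive non-'1' characters; on each '1'
--     # record the run; the run after the last '1' is never recorded.
--     max_gap = 0
--     count = 0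
--     for ch in bin(n):
--         if ch == '1':
--             if count > max_gap:
--                 max_gap = count
--             count = 0
--         else:
--             count += 1
--     return max_gap
-- ===== Notes on version B (the rewrite author's own statement) =====
-- stated objective: simpler
-- what changed: Replaces split('1')/pop/max-over-pieces with a single character scan keeping a running counter of non-'1' characters, recorded only when a '1' is hit (so the trailing run is dropped), building no intermediate list of substrings.
import Mathlib
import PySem

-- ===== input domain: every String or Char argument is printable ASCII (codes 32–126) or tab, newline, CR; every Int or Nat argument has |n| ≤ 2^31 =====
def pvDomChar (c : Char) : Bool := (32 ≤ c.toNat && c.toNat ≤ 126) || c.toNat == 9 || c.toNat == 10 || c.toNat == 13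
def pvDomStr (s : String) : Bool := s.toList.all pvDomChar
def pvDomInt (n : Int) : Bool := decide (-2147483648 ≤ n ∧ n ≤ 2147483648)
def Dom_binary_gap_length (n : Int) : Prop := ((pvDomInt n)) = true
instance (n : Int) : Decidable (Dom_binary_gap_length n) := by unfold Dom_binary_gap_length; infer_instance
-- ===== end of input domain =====

-- B replaces A's split('1')/pop/max-over-pieces with a single character scan and a
-- running counter (objective: simpler — no intermediate list of pieces is built).

-- ===== PORT A =====
-- binary = bin(n); gaps = binary.split("1"); gaps.pop(); for gap in gaps: max_gap = max(max_gap, len(gap))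
-- (gaps is always nonempty, so .pop() never raises; the list after pop is gaps.dropLast)
def binary_gap_length (n : Int) : Int :=
  let binary : String := PySem.Int.pyBin n
  let gaps : List (List Char) := PySem.Chars.splitOn binary.toList ['1']
  let gaps' := gaps.dropLast
  gaps'.foldl (fun max_gap gap => max max_gap (gap.length : Int)) 0

-- ===== PORT B =====
-- scan of Source B's for-loop: state (count, max_gap); on '1' record count, else count += 1
def bglScan : List Char → Int → Int → Int
  | [], _, max_gap => max_gap
  | ch :: rest, count, max_gap =>
    if ch = '1' then bglScan rest 0 (if count > max_gap then count else max_gap)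
    else bglScan rest (count + 1) max_gap

def binary_gap_length_alt (n : Int) : Int :=
  bglScan (PySem.Int.pyBin n).toList 0 0

-- ===== PRECONDITION & SPEC =====
def Spec_binary_gap_length (n : Int) (out : Int) : Prop := out = binary_gap_length_alt n
instance (n : Int) (out : Int) : Decidable (Spec_binary_gap_length n out) := by unfold Spec_binary_gap_length; infer_instance

-- ===== CLAIM (what is proved, stated in full; the proofs are below) =====
def Claim_equal_binary_gap_length : Prop := ∀ (n : Int), Dom_binary_gap_length n → Spec_binary_gap_length n (binary_gap_length n)

-- ===== LEMMAS AND PROOFS =====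

-- structural version of split on a single character
def bglSplit (cs : List Char) : List (List Char) :=
  match cs with
  | [] => [[]]
  | x :: t =>
    if x = '1' then [] :: bglSplit t
    else
      match bglSplit t with
      | [] => [[x]]   -- unreachable: bglSplit is never []
      | h :: tl => (x :: h) :: tl

lemma bglSplit_ne_nil (cs : List Char) : bglSplit cs ≠ [] := by
  cases cs with
  | nil => simp [bglSplit]
  | cons x t =>
    simp only [bglSplit]
    split_ifs
    · simp
    · cases h : bglSplit t <;> simp

lemma splitOn_go_spec (fuel : Nat) (l cur : List Char) (acc : List (List Char))
    (h : l.length < fuel) :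
    PySem.Chars.splitOn.go ['1'] fuel l cur acc =
      acc.reverse ++ ((bglSplit l).modifyHead (fun g => cur.reverse ++ g)) := by
  induction fuel generalizing l cur acc with
  | zero => omega
  | succ fuel ih =>
    cases l with
    | nil => simp [PySem.Chars.splitOn.go, bglSplit]
    | cons c rest =>
      by_cases hc : c = '1'
      · subst hc
        have hpre : List.isPrefixOf ['1'] ('1' :: rest) = true := by
          simp [List.isPrefixOf]
        rw [PySem.Chars.splitOn.go]
        simp only [hpre, if_true, List.length_nil, List.length_cons, Nat.zero_add,
          List.drop_succ_cons, List.drop_zero] at *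
        rw [ih rest [] (cur.reverse :: acc) (by omega)]
        simp only [bglSplit, if_true, List.reverse_nil, List.nil_append, List.reverse_cons,
          List.modifyHead_cons, List.append_assoc, List.singleton_append]
        cases bglSplit rest <;> simp
      · have hpre : List.isPrefixOf ['1'] (c :: rest) = false := by
          simp [List.isPrefixOf]
          intro h'; exact absurd h'.symm hc
        rw [PySem.Chars.splitOn.go]
        simp only [hpre, Bool.false_eq_true, if_false]
        rw [ih rest (c :: cur) acc (by simpa using Nat.lt_of_succ_lt_succ h)]
        simp only [bglSplit, hc, if_false]
        rcases hs : bglSplit rest with _ | ⟨h', tl⟩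
        · exact absurd hs (bglSplit_ne_nil rest)
        · simp

lemma splitOn_eq_bglSplit (cs : List Char) :
    PySem.Chars.splitOn cs ['1'] = bglSplit cs := by
  unfold PySem.Chars.splitOn
  rw [splitOn_go_spec cs.length.succ cs [] [] (by omega)]
  cases h : bglSplit cs with
  | nil => exact absurd h (bglSplit_ne_nil cs)
  | cons g gs => simp

-- the scan computes A's fold over the pieces before the last one, with the running
-- counter added to the first piece's length
lemma bglScan_eq (cs : List Char) : ∀ (c m : Int),
    bglScan cs c m =
      match (bglSplit cs).dropLast with
      | [] => m
      | g :: gs => gs.foldl (fun a g => max a (g.length : Int)) (max m (c + g.length)) := by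
  induction cs with
  | nil => intro c m; simp [bglScan, bglSplit]
  | cons x t ih =>
    intro c m
    by_cases hx : x = '1'
    · subst hx
      simp only [bglScan, if_true, bglSplit]
      rw [ih 0 (if c > m then c else m)]
      have hmax : (if c > m then c else m) = max m c := by
        split_ifs with h <;> omega
      rw [List.dropLast_cons_of_ne_nil (bglSplit_ne_nil t)]
      rcases hd : (bglSplit t).dropLast with _ | ⟨g, gs⟩
      · simp [hmax]
      · simp only [hmax, List.foldl_cons]
        congr 1
        simp
    · simp only [bglScan, hx, if_false, bglSplit]
      rcases hs : bglSplit t with _ | ⟨h', tl⟩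
      · exact absurd hs (bglSplit_ne_nil t)
      · rw [ih (c + 1) m, hs]
        cases tl with
        | nil => simp
        | cons a b =>
          rw [List.dropLast_cons_of_ne_nil (by simp : (a :: b) ≠ []),
              List.dropLast_cons_of_ne_nil (by simp : (a :: b) ≠ [])]
          dsimp only
          have harg : (c + 1) + (h'.length : Int) = c + ((x :: h').length : Int) := by
            push_cast [List.length_cons]; ring
          rw [harg]

-- ===== VERDICT (by name: the statement is the Claim_ definition above) =====
theorem binary_gap_length_spec : Claim_equal_binary_gap_length := by
  intro n _
  simp only [Spec_binary_gap_length, binary_gap_length, binary_gap_length_alt]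
  rw [splitOn_eq_bglSplit, bglScan_eq]
  rcases hd : (bglSplit (PySem.Int.pyBin n).toList).dropLast with _ | ⟨g, gs⟩
  · simp
  · simp only [List.foldl_cons]
    congr 1
    omega
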